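-- pv_equiv track=rewrite | github.com/DAXNoobJustin/dax-noob | src/mcp/model_metadata.py | _expand_tables_via_relationships
-- ===== SOURCE A (Python) =====
-- from typing import Dict, List, Any, Optional
--
-- def _expand_tables_via_relationships(initial_tables: set, relationships: List[Dict[str, Any]]) -> set:
--     """
--     Expand the set of tables to include related tables based on relationships.
--     This follows filtering propagation through the relationship graph.
--     """
--     expanded_tables = set(initial_tables)
--     changed = True
--
--     # Keep expanding until no new tables are added
--     while changed:
--         changed = False
--         for rel in relationships:
--             from_table = rel.get("from_table", "")
--             to_table = rel.get("to_table", "")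
--
--             # If we have one table in the relationship, add the other
--             if from_table in expanded_tables and to_table not in expanded_tables:
--                 expanded_tables.add(to_table)
--                 changed = True
--             elif to_table in expanded_tables and from_table not in expanded_tables:
--                 expanded_tables.add(from_table)
--                 changed = True
--
--     return expanded_tables
-- ===== SOURCE B (Python) =====
-- from typing import Dict, List, Any
--
--
-- def _expand_tables_via_relationships(initial_tables: set, relationships: List[Dict[str, Any]]) -> set:
--     # Build an adjacency dict once, then do a depth-first worklist traversal from
--     # the initial tables: each node's neighbours are looked up directly instead of
--     # re-scanning the whole relationship list until a fixpoint is reached.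
--     adj = {}
--     for rel in relationships:
--         a = rel.get("from_table", "")
--         b = rel.get("to_table", "")
--         adj.setdefault(a, []).append(b)
--         adj.setdefault(b, []).append(a)
--     visited = set(initial_tables)
--     stack = list(initial_tables)
--     while stack:
--         node = stack.pop()
--         for nb in adj.get(node, []):
--             if nb not in visited:
--                 visited.add(nb)
--                 stack.append(nb)
--     return visited
-- ===== Notes on version B (the rewrite author's own statement) =====
-- stated objective: alternative
-- what changed: A repeatedly re-scans the whole relationship list with a changed flag until a pass adds nothing; B builds an adjacency dict once and runs a depth-first worklist traversal from the initial tables, looking up each node's neighbours directly, so the edge list is scanned exactly once.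
import Mathlib
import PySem

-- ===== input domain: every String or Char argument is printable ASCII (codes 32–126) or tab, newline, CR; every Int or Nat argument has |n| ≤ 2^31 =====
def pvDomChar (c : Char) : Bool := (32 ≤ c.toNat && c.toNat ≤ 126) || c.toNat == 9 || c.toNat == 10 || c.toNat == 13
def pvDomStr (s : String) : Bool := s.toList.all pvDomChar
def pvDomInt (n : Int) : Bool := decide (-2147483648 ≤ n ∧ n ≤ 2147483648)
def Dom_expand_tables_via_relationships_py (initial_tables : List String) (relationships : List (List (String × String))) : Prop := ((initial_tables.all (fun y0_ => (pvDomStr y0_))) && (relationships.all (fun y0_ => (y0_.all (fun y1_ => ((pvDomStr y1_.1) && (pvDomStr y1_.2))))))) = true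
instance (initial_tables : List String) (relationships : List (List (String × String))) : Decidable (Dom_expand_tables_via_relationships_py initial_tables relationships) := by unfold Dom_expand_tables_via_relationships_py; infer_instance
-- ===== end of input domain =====

-- B builds an adjacency dict once and runs a depth-first worklist traversal from the initial
-- tables, instead of A's repeated full scans of the relationship list until a fixpoint;
-- objective: alternative algorithm (single scan of the edge list + worklist).
-- Both Pythons RETURN A SET (no order is defined on the value); each port returns the set's
-- elements in sorted order, the canonical representation of the order-free returned value.

-- ===== PORT A =====

-- one pass of A's 'for rel in relationships' body, threading (expanded_tables, changed)
def pvPassA (relationships : List (List (String × String))) (s : PySem.Set String) :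
    PySem.Set String × Bool :=
  relationships.foldl (fun st rel =>
    let from_table := PySem.Dict.getD (PySem.Dict.ofList rel) "from_table" ""
    let to_table := PySem.Dict.getD (PySem.Dict.ofList rel) "to_table" ""
    if PySem.Set.contains st.1 from_table && !PySem.Set.contains st.1 to_table then
      (PySem.Set.add st.1 to_table, true)
    else if PySem.Set.contains st.1 to_table && !PySem.Set.contains st.1 from_table then
      (PySem.Set.add st.1 from_table, true)
    else st) (s, false)

-- A's 'while changed' loop; the fuel len(relationships)+1 is an upper bound on the number of
-- iterations the Python loop performs (proved via pvSat below), so the port is exact.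
def pvLoopA (relationships : List (List (String × String))) :
    Nat → PySem.Set String → PySem.Set String
  | 0, s => s
  | fuel + 1, s =>
    let p := pvPassA relationships s
    if p.2 then pvLoopA relationships fuel p.1 else p.1

def expand_tables_via_relationships_py (initial_tables : List String) (relationships : List (List (String × String))) : List String :=
  PySem.List.sorted (pvLoopA relationships (relationships.length + 1) (PySem.Set.ofList initial_tables)) (fun x => x) false

-- ===== PORT B =====

-- adj.setdefault(a, []).append(b) = adj[a] = adj.get(a, []) + [b] = Dict.modify
def pvAdjB (relationships : List (List (String × String))) : PySem.Dict String (List String) :=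
  relationships.foldl (fun d rel =>
    let a := PySem.Dict.getD (PySem.Dict.ofList rel) "from_table" ""
    let b := PySem.Dict.getD (PySem.Dict.ofList rel) "to_table" ""
    let d1 := PySem.Dict.modify d a [] (fun l => l ++ [b])
    PySem.Dict.modify d1 b [] (fun l => l ++ [a])) PySem.Dict.empty

-- the 'while stack' loop: stack top at the list head (Python pops from the end of the list,
-- so the initial stack list(initial_tables) becomes initial_tables.reverse); the fuel
-- len(initial)+2*len(relationships)+1 bounds the iterations (each iteration pops one entry,
-- and entries are pushed once per initial element or newly visited endpoint; proved below).
def pvDfs (adj : PySem.Dict String (List String)) :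
    Nat → List String → PySem.Set String → PySem.Set String
  | 0, _, visited => visited
  | _ + 1, [], visited => visited
  | fuel + 1, node :: stack, visited =>
      let st := (PySem.Dict.getD adj node []).foldl
        (fun (p : List String × PySem.Set String) nb =>
          if PySem.Set.contains p.2 nb then p
          else (nb :: p.1, PySem.Set.add p.2 nb)) (stack, visited)
      pvDfs adj fuel st.1 st.2

def expand_tables_via_relationships_py_alt (initial_tables : List String) (relationships : List (List (String × String))) : List String :=
  let adj := pvAdjB relationships
  let res := pvDfs adj (initial_tables.length + 2 * relationships.length + 1)
      initial_tables.reverse (PySem.Set.ofList initial_tables)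
  PySem.List.sorted res (fun x => x) false

-- ===== PRECONDITION & SPEC =====
def Spec_expand_tables_via_relationships_py (initial_tables : List String) (relationships : List (List (String × String))) (out : List String) : Prop := out = expand_tables_via_relationships_py_alt initial_tables relationships
instance (initial_tables : List String) (relationships : List (List (String × String))) (out : List String) : Decidable (Spec_expand_tables_via_relationships_py initial_tables relationships out) := by unfold Spec_expand_tables_via_relationships_py; infer_instance

-- ===== CLAIM (what is proved, stated in full; the proofs are below) =====
def Claim_equal_expand_tables_via_relationships_py : Prop := ∀ (initial_tables : List String) (relationships : List (List (String × String))), Dom_expand_tables_via_relationships_py initial_tables relationships → Spec_expand_tables_via_relationships_py initial_tables relationships (expand_tables_via_relationships_py initial_tables relationships)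

-- ===== LEMMAS AND PROOFS =====

-- the (from_table, to_table) pairs A reads and B indexes
def pvEdges (relationships : List (List (String × String))) : List (String × String) :=
  relationships.map (fun rel =>
    (PySem.Dict.getD (PySem.Dict.ofList rel) "from_table" "",
     PySem.Dict.getD (PySem.Dict.ofList rel) "to_table" ""))

-- one of A's passes, on the extracted edges, without the changed flag
def pvStepB (edges : List (String × String)) (s : PySem.Set String) : PySem.Set String :=
  edges.foldl (fun s e =>
    if PySem.Set.contains s e.1 || PySem.Set.contains s e.2 then
      PySem.Set.add (PySem.Set.add s e.1) e.2
    else s) s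

def pvAdjList (adj : PySem.Dict String (List String)) (v : String) : List String :=
  PySem.Dict.getD adj v []

-- a set closed under the (undirected) edges
def pvClosedE (edges : List (String × String)) (S : List String) : Prop :=
  ∀ e ∈ edges, (e.1 ∈ S ↔ e.2 ∈ S)

-- a set closed under the adjacency dict
def pvClosedAdj (adj : PySem.Dict String (List String)) (S : List String) : Prop :=
  ∀ v ∈ S, ∀ nb ∈ pvAdjList adj v, nb ∈ S

theorem pvAdd_of_contains {s : PySem.Set String} {x : String}
    (h : PySem.Set.contains s x = true) : PySem.Set.add s x = s := by
  unfold PySem.Set.add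
  rw [if_pos h]

theorem pvPrefix_add (s : PySem.Set String) (x : String) : s <+: PySem.Set.add s x := by
  unfold PySem.Set.add
  split
  · exact List.prefix_refl s
  · exact List.prefix_append s [x]

theorem pvPrefix_stepB (edges : List (String × String)) (s : PySem.Set String) :
    s <+: pvStepB edges s := by
  induction edges generalizing s with
  | nil => exact List.prefix_refl s
  | cons e t ih =>
    simp only [pvStepB, List.foldl_cons]
    split
    · exact ((pvPrefix_add s e.1).trans (pvPrefix_add _ e.2)).trans (ih _)
    · exact ih s

theorem pvContains_iff {s : PySem.Set String} {x : String} :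
    PySem.Set.contains s x = true ↔ x ∈ s := by
  unfold PySem.Set.contains
  exact List.contains_iff_mem

theorem pvContains_mono {s t : PySem.Set String} {x : String} (h : s <+: t)
    (hx : PySem.Set.contains s x = true) : PySem.Set.contains t x = true :=
  pvContains_iff.mpr (h.subset (pvContains_iff.mp hx))

theorem pvStepB_cons (e : String × String) (et : List (String × String))
    (s : PySem.Set String) :
    pvStepB (e :: et) s
    = pvStepB et (if PySem.Set.contains s e.1 || PySem.Set.contains s e.2 then
        PySem.Set.add (PySem.Set.add s e.1) e.2 else s) := rfl

theorem pvNe_of_add (et : List (String × String)) (s : PySem.Set String) (x : String)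
    (hx : PySem.Set.contains s x = false) :
    pvStepB et (PySem.Set.add s x) ≠ s := by
  intro heq
  have hmem : x ∈ pvStepB et (PySem.Set.add s x) :=
    (pvPrefix_stepB et _).subset ((PySem.Set.mem_add s x x).mpr (Or.inr rfl))
  rw [heq] at hmem
  rw [pvContains_iff.mpr hmem] at hx
  exact absurd hx (by simp)

-- A's changed-flag fold over the extracted edges computes pvStepB,
-- and its flag tells whether the set changed
theorem pvFoldA_eq (es : List (String × String)) (s : PySem.Set String) (c : Bool) :
    es.foldl (fun st e =>
      if PySem.Set.contains st.1 e.1 && !PySem.Set.contains st.1 e.2 then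
        (PySem.Set.add st.1 e.2, true)
      else if PySem.Set.contains st.1 e.2 && !PySem.Set.contains st.1 e.1 then
        (PySem.Set.add st.1 e.1, true)
      else st) (s, c)
    = (pvStepB es s, c || decide (pvStepB es s ≠ s)) := by
  induction es generalizing s c with
  | nil => simp [pvStepB]
  | cons e t ih =>
    rw [List.foldl_cons, pvStepB_cons]
    cases hft : PySem.Set.contains s e.1 <;> cases htt : PySem.Set.contains s e.2
    · -- neither endpoint present: nothing happens
      simp only [Bool.false_and, Bool.not_false, Bool.false_or, if_neg,
        Bool.false_eq_true, not_false_eq_true]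
      exact ih s c
    · -- only e.2 present: A adds e.1; the double add collapses to the same
      simp only [Bool.not_false, Bool.and_true, Bool.not_true, Bool.and_false,
        Bool.false_or, if_true, Bool.false_eq_true, if_false]
      rw [pvAdd_of_contains (pvContains_mono (pvPrefix_add s e.1) htt), ih]
      rw [decide_eq_true (pvNe_of_add t s e.1 hft)]
      simp
    · -- only e.1 present: A adds e.2; step adds e.1 (a no-op) then e.2
      simp only [Bool.true_and, Bool.not_false, Bool.true_or, if_true]
      rw [pvAdd_of_contains hft, ih]
      rw [decide_eq_true (pvNe_of_add t s e.2 htt)]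
      simp
    · -- both present: both sides leave the set unchanged
      simp only [Bool.not_true, Bool.and_false, Bool.true_or, if_true,
        Bool.false_eq_true, if_false]
      rw [pvAdd_of_contains hft, pvAdd_of_contains htt]
      exact ih s c

theorem pvPassA_spec (relationships : List (List (String × String))) (s : PySem.Set String) :
    pvPassA relationships s
    = (pvStepB (pvEdges relationships) s,
       decide (pvStepB (pvEdges relationships) s ≠ s)) := by
  have h : pvPassA relationships s
      = (pvEdges relationships).foldl (fun st e =>
          if PySem.Set.contains st.1 e.1 && !PySem.Set.contains st.1 e.2 then
            (PySem.Set.add st.1 e.2, true)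
          else if PySem.Set.contains st.1 e.2 && !PySem.Set.contains st.1 e.1 then
            (PySem.Set.add st.1 e.1, true)
          else st) (s, false) := by
    unfold pvPassA pvEdges
    rw [List.foldl_map]
  rw [h, pvFoldA_eq]
  simp

-- an edge is saturated when both endpoints are in the set
def pvIsSat (s : PySem.Set String) (e : String × String) : Bool :=
  PySem.Set.contains s e.1 && PySem.Set.contains s e.2

def pvSat (edges : List (String × String)) (s : PySem.Set String) : Nat :=
  edges.countP (pvIsSat s)

-- if a pass changes the set, some edge was unsaturated before and is saturated after
theorem pvKey (edges : List (String × String)) (s : PySem.Set String)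
    (h : pvStepB edges s ≠ s) :
    ∃ e ∈ edges, pvIsSat s e = false ∧ pvIsSat (pvStepB edges s) e = true := by
  induction edges generalizing s with
  | nil => exact absurd rfl h
  | cons e t ih =>
    rw [pvStepB_cons] at h ⊢
    cases hft : PySem.Set.contains s e.1 <;> cases htt : PySem.Set.contains s e.2
    · -- neither endpoint present: this edge does nothing
      rw [hft, htt] at h
      simp only [Bool.or_self, Bool.false_eq_true, if_false] at h ⊢
      obtain ⟨e', he', h1, h2⟩ := ih s h
      exact ⟨e', List.mem_cons_of_mem e he', h1, h2⟩
    · -- e.1 missing, e.2 present: this edge fires and becomes saturated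
      rw [hft, htt] at h
      simp only [Bool.false_or, if_true] at h ⊢
      refine ⟨e, List.mem_cons_self, ?_, ?_⟩
      · unfold pvIsSat; rw [hft, Bool.false_and]
      · have hpre := pvPrefix_stepB t (PySem.Set.add (PySem.Set.add s e.1) e.2)
        have m1 : e.1 ∈ PySem.Set.add (PySem.Set.add s e.1) e.2 :=
          (PySem.Set.mem_add _ _ _).mpr (Or.inl ((PySem.Set.mem_add _ _ _).mpr (Or.inr rfl)))
        have m2 : e.2 ∈ PySem.Set.add (PySem.Set.add s e.1) e.2 :=
          (PySem.Set.mem_add _ _ _).mpr (Or.inr rfl)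
        unfold pvIsSat
        rw [pvContains_mono hpre (pvContains_iff.mpr m1),
            pvContains_mono hpre (pvContains_iff.mpr m2), Bool.and_self]
    · -- e.1 present, e.2 missing: this edge fires and becomes saturated
      rw [hft, htt] at h
      simp only [Bool.true_or, if_true] at h ⊢
      refine ⟨e, List.mem_cons_self, ?_, ?_⟩
      · unfold pvIsSat; rw [htt, Bool.and_false]
      · have hpre := pvPrefix_stepB t (PySem.Set.add (PySem.Set.add s e.1) e.2)
        have m1 : e.1 ∈ PySem.Set.add (PySem.Set.add s e.1) e.2 :=
          (PySem.Set.mem_add _ _ _).mpr (Or.inl ((PySem.Set.mem_add _ _ _).mpr (Or.inr rfl)))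
        have m2 : e.2 ∈ PySem.Set.add (PySem.Set.add s e.1) e.2 :=
          (PySem.Set.mem_add _ _ _).mpr (Or.inr rfl)
        unfold pvIsSat
        rw [pvContains_mono hpre (pvContains_iff.mpr m1),
            pvContains_mono hpre (pvContains_iff.mpr m2), Bool.and_self]
    · -- both present: the double add is a no-op
      rw [hft, htt] at h
      simp only [Bool.or_self, if_true] at h ⊢
      rw [pvAdd_of_contains hft, pvAdd_of_contains htt] at h ⊢
      obtain ⟨e', he', h1, h2⟩ := ih s h
      exact ⟨e', List.mem_cons_of_mem e he', h1, h2⟩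

theorem pvCountP_strict {l : List (String × String)} {p q : (String × String) → Bool}
    (hmono : ∀ x ∈ l, p x = true → q x = true)
    (e : String × String) (he : e ∈ l) (hp : p e = false) (hq : q e = true) :
    l.countP p < l.countP q := by
  induction l with
  | nil => cases he
  | cons a t ih =>
    have hle : t.countP p ≤ t.countP q :=
      List.countP_mono_left (fun x hx => hmono x (List.mem_cons_of_mem a hx))
    rw [List.countP_cons, List.countP_cons]
    rcases List.mem_cons.mp he with rfl | he'
    · rw [hp, hq]
      simp only [Bool.false_eq_true, if_false, if_true]
      omega
    · have hlt := ih (fun x hx hpx => hmono x (List.mem_cons_of_mem a hx) hpx) he'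
      cases hpa : p a
      · cases hqa : q a <;> simp <;> omega
      · rw [hmono a List.mem_cons_self hpa]
        simp
        omega

theorem pvSat_strict (edges : List (String × String)) (s : PySem.Set String)
    (h : pvStepB edges s ≠ s) :
    pvSat edges s < pvSat edges (pvStepB edges s) := by
  obtain ⟨e, he, hns, hs⟩ := pvKey edges s h
  exact pvCountP_strict
    (fun x _ hx => by
      unfold pvIsSat at hx ⊢
      rcases Bool.and_eq_true_iff.mp hx with ⟨h1, h2⟩
      rw [pvContains_mono (pvPrefix_stepB edges s) h1,
          pvContains_mono (pvPrefix_stepB edges s) h2, Bool.and_self])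
    e he hns hs

theorem pvSat_lt_length (edges : List (String × String)) (s : PySem.Set String)
    (h : pvStepB edges s ≠ s) : pvSat edges s < edges.length := by
  obtain ⟨e, he, hns, _⟩ := pvKey edges s h
  refine Nat.lt_of_le_of_ne List.countP_le_length (fun hc => ?_)
  have := List.countP_eq_length.mp hc e he
  rw [hns] at this; exact Bool.false_ne_true this

-- within len(edges) passes a fixpoint is reached
theorem pvExists_fix (edges : List (String × String)) (s0 : PySem.Set String) :
    ∃ i ≤ edges.length,
      pvStepB edges ((pvStepB edges)^[i] s0) = (pvStepB edges)^[i] s0 := by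
  by_contra hno
  push Not at hno
  have chain : ∀ i, i ≤ edges.length → i ≤ pvSat edges ((pvStepB edges)^[i] s0) := by
    intro i
    induction i with
    | zero => intro _; exact Nat.zero_le _
    | succ n ih =>
      intro hle
      have hn : n ≤ edges.length := Nat.le_of_succ_le hle
      have hnf := hno n hn
      have := pvSat_strict edges ((pvStepB edges)^[n] s0) hnf
      rw [← Function.iterate_succ_apply' (pvStepB edges) n s0] at this
      simp only [Nat.succ_eq_add_one] at this
      have := ih hn
      omega
  have h1 := chain edges.length (Nat.le_refl _)
  have h2 := pvSat_lt_length edges ((pvStepB edges)^[edges.length] s0)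
    (hno edges.length (Nat.le_refl _))
  omega

-- A's fueled loop reaches the same fixpoint as n iterations of the pass
theorem pvLoopA_eq_iter (relationships : List (List (String × String))) :
    ∀ (fuel : Nat) (s : PySem.Set String) (n : Nat),
      (∃ i < fuel, pvStepB (pvEdges relationships) ((pvStepB (pvEdges relationships))^[i] s)
                   = (pvStepB (pvEdges relationships))^[i] s) →
      (∃ i ≤ n, pvStepB (pvEdges relationships) ((pvStepB (pvEdges relationships))^[i] s)
                = (pvStepB (pvEdges relationships))^[i] s) →
      pvLoopA relationships fuel s = (pvStepB (pvEdges relationships))^[n] s := by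
  intro fuel
  induction fuel with
  | zero =>
    intro s n hfuel _
    obtain ⟨i, hi, _⟩ := hfuel
    omega
  | succ f ih =>
    intro s n hfuel hn
    simp only [pvLoopA]
    rw [pvPassA_spec]
    by_cases hfix : pvStepB (pvEdges relationships) s = s
    · rw [hfix]
      simp only [ne_eq, not_true_eq_false, decide_false, Bool.false_eq_true, if_false]
      exact (Function.iterate_fixed hfix n).symm
    · rw [decide_eq_true hfix, if_pos rfl]
      obtain ⟨i, hi, hfi⟩ := hfuel
      cases i with
      | zero => exact absurd hfi hfix
      | succ j =>
        rw [Function.iterate_succ_apply] at hfi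
        obtain ⟨i', hi', hf'⟩ := hn
        cases i' with
        | zero => exact absurd hf' hfix
        | succ k =>
          rw [Function.iterate_succ_apply] at hf'
          cases n with
          | zero => omega
          | succ m =>
            rw [Function.iterate_succ_apply]
            exact ih (pvStepB (pvEdges relationships) s) m
              ⟨j, by omega, hfi⟩ ⟨k, by omega, hf'⟩

-- a fixpoint of the pass is closed under the edges
theorem pvFix_closed (edges : List (String × String)) (S : PySem.Set String)
    (h : pvStepB edges S = S) : pvClosedE edges S := by
  induction edges generalizing S with
  | nil => intro e he; cases he
  | cons e t ih =>
    rw [pvStepB_cons] at h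
    by_cases hc : (PySem.Set.contains S e.1 || PySem.Set.contains S e.2) = true
    · rw [if_pos hc] at h
      -- the updated set is sandwiched between S and the final S, so it equals S
      have h1 : S <+: PySem.Set.add (PySem.Set.add S e.1) e.2 :=
        (pvPrefix_add S e.1).trans (pvPrefix_add _ e.2)
      have h2 : PySem.Set.add (PySem.Set.add S e.1) e.2 <+: S := by
        have := pvPrefix_stepB t (PySem.Set.add (PySem.Set.add S e.1) e.2)
        rwa [h] at this
      have heq : PySem.Set.add (PySem.Set.add S e.1) e.2 = S :=
        h2.eq_of_length (Nat.le_antisymm h2.length_le h1.length_le)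
      have hm1 : e.1 ∈ S := by
        rw [← heq]
        exact (PySem.Set.mem_add _ _ _).mpr
          (Or.inl ((PySem.Set.mem_add _ _ _).mpr (Or.inr rfl)))
      have hm2 : e.2 ∈ S := by
        rw [← heq]
        exact (PySem.Set.mem_add _ _ _).mpr (Or.inr rfl)
      intro e' he'
      rcases List.mem_cons.mp he' with rfl | he'
      · exact ⟨fun _ => hm2, fun _ => hm1⟩
      · rw [heq] at h
        exact ih S h e' he'
    · rw [if_neg hc] at h
      have hnot := Bool.or_eq_false_iff.mp (Bool.eq_false_iff.mpr hc)
      intro e' he'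
      rcases List.mem_cons.mp he' with rfl | he'
      · constructor
        · intro hm
          exact absurd (hnot.1.symm.trans (pvContains_iff.mpr hm)) Bool.false_ne_true
        · intro hm
          exact absurd (hnot.2.symm.trans (pvContains_iff.mpr hm)) Bool.false_ne_true
      · exact ih S h e' he'

-- the pass stays inside any closed superset
theorem pvStepB_sub (edges : List (String × String)) (S T : PySem.Set String)
    (hsub : ∀ x ∈ S, x ∈ T) (hcl : pvClosedE edges T) :
    ∀ x ∈ pvStepB edges S, x ∈ T := by
  induction edges generalizing S with
  | nil => exact hsub
  | cons e t ih =>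
    rw [pvStepB_cons]
    have hclt : pvClosedE t T := fun e' he' => hcl e' (List.mem_cons_of_mem e he')
    by_cases hc : (PySem.Set.contains S e.1 || PySem.Set.contains S e.2) = true
    · rw [if_pos hc]
      have hhead := hcl e List.mem_cons_self
      have hboth : e.1 ∈ T ∧ e.2 ∈ T := by
        rcases Bool.or_eq_true_iff.mp hc with h1 | h2
        · have := hsub e.1 (pvContains_iff.mp h1)
          exact ⟨this, hhead.mp this⟩
        · have := hsub e.2 (pvContains_iff.mp h2)
          exact ⟨hhead.mpr this, this⟩
      refine ih _ (fun x hx => ?_) hclt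
      rcases (PySem.Set.mem_add _ _ _).mp hx with hx | rfl
      · rcases (PySem.Set.mem_add _ _ _).mp hx with hx | rfl
        · exact hsub x hx
        · exact hboth.1
      · exact hboth.2
    · rw [if_neg hc]
      exact ih S hsub hclt

theorem pvIter_sub (edges : List (String × String)) (s0 T : PySem.Set String)
    (hsub : ∀ x ∈ s0, x ∈ T) (hcl : pvClosedE edges T) (n : Nat) :
    ∀ x ∈ (pvStepB edges)^[n] s0, x ∈ T := by
  induction n with
  | zero => exact hsub
  | succ m ih =>
    rw [Function.iterate_succ_apply']
    exact pvStepB_sub edges _ T ih hcl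

theorem pvPrefix_iter (edges : List (String × String)) (s0 : PySem.Set String) (n : Nat) :
    s0 <+: (pvStepB edges)^[n] s0 := by
  induction n with
  | zero => exact List.prefix_refl s0
  | succ m ih =>
    rw [Function.iterate_succ_apply']
    exact ih.trans (pvPrefix_stepB edges _)

theorem pvNodup_stepB (edges : List (String × String)) (S : PySem.Set String)
    (h : S.Nodup) : (pvStepB edges S).Nodup := by
  induction edges generalizing S with
  | nil => exact h
  | cons e t ih =>
    rw [pvStepB_cons]
    split
    · exact ih _ (PySem.Set.nodup_add _ _ (PySem.Set.nodup_add _ _ h))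
    · exact ih S h

theorem pvNodup_iter (edges : List (String × String)) (s0 : PySem.Set String)
    (h : s0.Nodup) (n : Nat) : ((pvStepB edges)^[n] s0).Nodup := by
  induction n with
  | zero => exact h
  | succ m ih =>
    rw [Function.iterate_succ_apply']
    exact pvNodup_stepB edges _ ih

-- the (from_table, to_table) pair of one relationship, and one step of B's adjacency build
def pvEdge (rel : List (String × String)) : String × String :=
  (PySem.Dict.getD (PySem.Dict.ofList rel) "from_table" "",
   PySem.Dict.getD (PySem.Dict.ofList rel) "to_table" "")

def pvAdjStep (d : PySem.Dict String (List String)) (rel : List (String × String)) :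
    PySem.Dict String (List String) :=
  PySem.Dict.modify (PySem.Dict.modify d (pvEdge rel).1 [] (fun l => l ++ [(pvEdge rel).2]))
    (pvEdge rel).2 [] (fun l => l ++ [(pvEdge rel).1])

theorem pvAdjB_eq_foldl (relationships : List (List (String × String))) :
    pvAdjB relationships = relationships.foldl pvAdjStep PySem.Dict.empty := rfl

theorem pvEdges_eq_map (relationships : List (List (String × String))) :
    pvEdges relationships = relationships.map pvEdge := rfl

theorem pvModify_append_mem (d : PySem.Dict String (List String)) (k x v nb : String) :
    nb ∈ PySem.Dict.getD (PySem.Dict.modify d k [] (fun l => l ++ [x])) v []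
    ↔ nb ∈ PySem.Dict.getD d v [] ∨ (k = v ∧ x = nb) := by
  rw [PySem.Dict.getD_modify]
  by_cases h : v = k
  · subst h
    simp [List.mem_append, eq_comm]
  · rw [if_neg h]
    constructor
    · exact fun hm => Or.inl hm
    · rintro (hm | ⟨rfl, rfl⟩)
      · exact hm
      · exact absurd rfl h

theorem pvAdjStep_mem (d : PySem.Dict String (List String)) (rel : List (String × String))
    (v nb : String) :
    nb ∈ PySem.Dict.getD (pvAdjStep d rel) v []
    ↔ nb ∈ PySem.Dict.getD d v []
      ∨ (pvEdge rel = (v, nb) ∨ pvEdge rel = (nb, v)) := by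
  unfold pvAdjStep
  rw [pvModify_append_mem, pvModify_append_mem, Prod.ext_iff, Prod.ext_iff]
  tauto

theorem pvAdjB_fold_mem (l : List (List (String × String))) :
    ∀ (d : PySem.Dict String (List String)) (v nb : String),
      nb ∈ PySem.Dict.getD (l.foldl pvAdjStep d) v []
      ↔ nb ∈ PySem.Dict.getD d v []
        ∨ ∃ p ∈ l.map pvEdge, p = (v, nb) ∨ p = (nb, v) := by
  induction l with
  | nil => simp
  | cons rel t ih =>
    intro d v nb
    rw [List.foldl_cons, ih, pvAdjStep_mem]
    simp only [List.map_cons, List.mem_cons]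
    constructor
    · rintro ((h | h) | ⟨p, hp, hc⟩)
      · exact Or.inl h
      · exact Or.inr ⟨pvEdge rel, Or.inl rfl, h⟩
      · exact Or.inr ⟨p, Or.inr hp, hc⟩
    · rintro (h | ⟨p, (rfl | hp), hc⟩)
      · exact Or.inl (Or.inl h)
      · exact Or.inl (Or.inr hc)
      · exact Or.inr ⟨p, hp, hc⟩

-- membership in the adjacency dict = being the other endpoint of some edge
theorem pvAdj_mem_iff (relationships : List (List (String × String))) (v nb : String) :
    nb ∈ pvAdjList (pvAdjB relationships) v
    ↔ ∃ p ∈ pvEdges relationships, p = (v, nb) ∨ p = (nb, v) := by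
  unfold pvAdjList
  rw [pvAdjB_eq_foldl, pvAdjB_fold_mem, pvEdges_eq_map]
  simp [PySem.Dict.getD_empty]

theorem pvClosedAdj_of_closedE (relationships : List (List (String × String)))
    (S : List String) (h : pvClosedE (pvEdges relationships) S) :
    pvClosedAdj (pvAdjB relationships) S := by
  intro v hv nb hnb
  obtain ⟨p, hp, hc⟩ := (pvAdj_mem_iff relationships v nb).mp hnb
  rcases hc with rfl | rfl
  · exact (h _ hp).mp hv
  · exact (h _ hp).mpr hv

theorem pvClosedE_of_closedAdj (relationships : List (List (String × String)))
    (S : List String) (h : pvClosedAdj (pvAdjB relationships) S) :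
    pvClosedE (pvEdges relationships) S := by
  intro e he
  constructor
  · intro h1
    exact h e.1 h1 e.2 ((pvAdj_mem_iff relationships e.1 e.2).mpr ⟨e, he, Or.inl rfl⟩)
  · intro h2
    exact h e.2 h2 e.1 ((pvAdj_mem_iff relationships e.2 e.1).mpr ⟨e, he, Or.inr rfl⟩)

-- one node's neighbour scan inside B's loop
def pvScanF : (List String × PySem.Set String) → String → (List String × PySem.Set String) :=
  fun p nb => if PySem.Set.contains p.2 nb then p else (nb :: p.1, PySem.Set.add p.2 nb)

theorem pvScan_facts (ns : List String) :
    ∀ (stack : List String) (visited : PySem.Set String),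
      visited <+: (ns.foldl pvScanF (stack, visited)).2 ∧
      (visited.Nodup → (ns.foldl pvScanF (stack, visited)).2.Nodup) ∧
      (∀ x ∈ (ns.foldl pvScanF (stack, visited)).2, x ∈ visited ∨ x ∈ ns) ∧
      (∀ x ∈ ns, x ∈ (ns.foldl pvScanF (stack, visited)).2) ∧
      (∀ x ∈ stack, x ∈ (ns.foldl pvScanF (stack, visited)).1) ∧
      (∀ x ∈ (ns.foldl pvScanF (stack, visited)).1,
        x ∈ stack ∨ x ∈ (ns.foldl pvScanF (stack, visited)).2) ∧
      ((ns.foldl pvScanF (stack, visited)).1.length + visited.length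
        = stack.length + (ns.foldl pvScanF (stack, visited)).2.length) ∧
      (∀ x ∈ (ns.foldl pvScanF (stack, visited)).2,
        x ∈ visited ∨ x ∈ (ns.foldl pvScanF (stack, visited)).1) := by
  induction ns with
  | nil =>
    intro stack visited
    refine ⟨List.prefix_refl _, fun h => h, fun x hx => Or.inl hx, fun x hx => absurd hx (List.not_mem_nil),
      fun x hx => hx, fun x hx => Or.inl hx, rfl, fun x hx => Or.inl hx⟩
  | cons nb t ih =>
    intro stack visited
    rw [List.foldl_cons]
    by_cases hc : PySem.Set.contains visited nb = true
    · have hstep : pvScanF (stack, visited) nb = (stack, visited) := by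
        unfold pvScanF; rw [if_pos hc]
      rw [hstep]
      obtain ⟨i1, i2, i3, i4, i5, i6, i7, i8⟩ := ih stack visited
      refine ⟨i1, i2, ?_, ?_, i5, i6, i7, i8⟩
      · intro x hx
        rcases i3 x hx with h | h
        · exact Or.inl h
        · exact Or.inr (List.mem_cons_of_mem nb h)
      · intro x hx
        rcases List.mem_cons.mp hx with rfl | hx
        · exact i1.subset (pvContains_iff.mp hc)
        · exact i4 x hx
    · have hnmem : nb ∉ visited := fun hm => hc (pvContains_iff.mpr hm)
      have hstep : pvScanF (stack, visited) nb = (nb :: stack, PySem.Set.add visited nb) := by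
        unfold pvScanF; rw [if_neg hc]
      rw [hstep]
      obtain ⟨i1, i2, i3, i4, i5, i6, i7, i8⟩ := ih (nb :: stack) (PySem.Set.add visited nb)
      have hpre : visited <+: PySem.Set.add visited nb := pvPrefix_add visited nb
      have hlen : (PySem.Set.add visited nb).length = visited.length + 1 := by
        rw [PySem.Set.add_of_not_mem hnmem, List.length_append, List.length_cons, List.length_nil]
      refine ⟨hpre.trans i1, ?_, ?_, ?_, ?_, ?_, ?_, ?_⟩
      · intro h
        exact i2 (PySem.Set.nodup_add _ _ h)
      · intro x hx
        rcases i3 x hx with h | h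
        · rcases (PySem.Set.mem_add _ _ _).mp h with h | rfl
          · exact Or.inl h
          · exact Or.inr List.mem_cons_self
        · exact Or.inr (List.mem_cons_of_mem nb h)
      · intro x hx
        rcases List.mem_cons.mp hx with rfl | hx
        · exact i1.subset ((PySem.Set.mem_add _ _ _).mpr (Or.inr rfl))
        · exact i4 x hx
      · intro x hx
        exact i5 x (List.mem_cons_of_mem nb hx)
      · intro x hx
        rcases i6 x hx with h | h
        · rcases List.mem_cons.mp h with rfl | h
          · exact Or.inr (i1.subset ((PySem.Set.mem_add _ _ _).mpr (Or.inr rfl)))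
          · exact Or.inl h
        · exact Or.inr h
      · rw [List.length_cons] at i7
        omega
      · intro x hx
        rcases i8 x hx with h | h
        · rcases (PySem.Set.mem_add _ _ _).mp h with h | rfl
          · exact Or.inl h
          · exact Or.inr (i5 x List.mem_cons_self)
        · exact Or.inr h

-- the facts the DFS loop maintains
theorem pvDfs_main (adj : PySem.Dict String (List String)) (allN : List String)
    (hDom : ∀ v nb, nb ∈ pvAdjList adj v → nb ∈ allN) :
    ∀ (fuel : Nat) (stack : List String) (visited : PySem.Set String),
      visited.Nodup →
      (∀ x ∈ visited, x ∈ allN) →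
      (∀ x ∈ stack, x ∈ visited) →
      (∀ v ∈ visited, v ∈ stack ∨ ∀ nb ∈ pvAdjList adj v, nb ∈ visited) →
      stack.length + (allN.length - visited.length) ≤ fuel →
      (∀ x ∈ visited, x ∈ pvDfs adj fuel stack visited) ∧
      (pvDfs adj fuel stack visited).Nodup ∧
      pvClosedAdj adj (pvDfs adj fuel stack visited) ∧
      (∀ T, pvClosedAdj adj T → (∀ x ∈ visited, x ∈ T) →
        ∀ x ∈ pvDfs adj fuel stack visited, x ∈ T) := by
  intro fuel
  induction fuel with
  | zero =>
    intro stack visited hnd hvisN hstk hproc hbound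
    cases stack with
    | cons a t => simp at hbound
    | nil =>
      refine ⟨fun x h => h, hnd, ?_, fun T _ hT x hx => hT x hx⟩
      intro v hv nb hnb
      rcases hproc v hv with h | h
      · cases h
      · exact h nb hnb
  | succ fuel ih =>
    intro stack visited hnd hvisN hstk hproc hbound
    cases stack with
    | nil =>
      refine ⟨fun x h => h, hnd, ?_, fun T _ hT x hx => hT x hx⟩
      intro v hv nb hnb
      rcases hproc v hv with h | h
      · cases h
      · exact h nb hnb
    | cons node stack =>
      have hstep : pvDfs adj (fuel + 1) (node :: stack) visited
          = pvDfs adj fuel ((pvAdjList adj node).foldl pvScanF (stack, visited)).1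
              ((pvAdjList adj node).foldl pvScanF (stack, visited)).2 := rfl
      obtain ⟨s1, s2, s3, s4, s5, s6, s7, s8⟩ :=
        pvScan_facts (pvAdjList adj node) stack visited
      have hnode : node ∈ visited := hstk node List.mem_cons_self
      -- invariants after the scan
      have hnd' := s2 hnd
      have hvisN' : ∀ x ∈ ((pvAdjList adj node).foldl pvScanF (stack, visited)).2, x ∈ allN := by
        intro x hx
        rcases s3 x hx with h | h
        · exact hvisN x h
        · exact hDom node x h
      have hstk' : ∀ x ∈ ((pvAdjList adj node).foldl pvScanF (stack, visited)).1,
          x ∈ ((pvAdjList adj node).foldl pvScanF (stack, visited)).2 := by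
        intro x hx
        rcases s6 x hx with h | h
        · exact s1.subset (hstk x (List.mem_cons_of_mem node h))
        · exact h
      have hproc' : ∀ v ∈ ((pvAdjList adj node).foldl pvScanF (stack, visited)).2,
          v ∈ ((pvAdjList adj node).foldl pvScanF (stack, visited)).1
          ∨ ∀ nb ∈ pvAdjList adj v, nb ∈ ((pvAdjList adj node).foldl pvScanF (stack, visited)).2 := by
        intro v hv
        rcases s8 v hv with hvis | hp1
        · rcases hproc v hvis with hmem | hdone
          · rcases List.mem_cons.mp hmem with rfl | hmem
            · exact Or.inr s4
            · exact Or.inl (s5 v hmem)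
          · exact Or.inr (fun nb hnb => s1.subset (hdone nb hnb))
        · exact Or.inl hp1
      have hbound' : ((pvAdjList adj node).foldl pvScanF (stack, visited)).1.length
          + (allN.length - ((pvAdjList adj node).foldl pvScanF (stack, visited)).2.length) ≤ fuel := by
        have hle : ((pvAdjList adj node).foldl pvScanF (stack, visited)).2.length ≤ allN.length :=
          ((s2 hnd).subperm hvisN').length_le
        have hvle : visited.length ≤ ((pvAdjList adj node).foldl pvScanF (stack, visited)).2.length :=
          s1.length_le
        rw [List.length_cons] at hbound
        omega
      obtain ⟨c1, c2, c3, c4⟩ := ih _ _ hnd' hvisN' hstk' hproc' hbound'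
      rw [hstep]
      refine ⟨fun x hx => c1 x (s1.subset hx), c2, c3, ?_⟩
      intro T hclT hsubT
      refine c4 T hclT ?_
      intro x hx
      rcases s3 x hx with h | h
      · exact hsubT x h
      · exact hclT node (hsubT node hnode) x h

-- ===== VERDICT (by name: the statement is the Claim_ definition above) =====
theorem expand_tables_via_relationships_py_spec : Claim_equal_expand_tables_via_relationships_py := by
  intro initial_tables relationships _
  unfold Spec_expand_tables_via_relationships_py
  unfold expand_tables_via_relationships_py expand_tables_via_relationships_py_alt
  -- names
  set edges := pvEdges relationships with hedges
  set s0 := PySem.Set.ofList initial_tables with hs0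
  set SA := (pvStepB edges)^[edges.length] s0 with hSA
  -- A's loop result is the fixpoint SA
  obtain ⟨i, hi, hfix⟩ := pvExists_fix edges s0
  have hlenE : edges.length = relationships.length := by
    rw [hedges]; unfold pvEdges; exact List.length_map _
  have hSAeq : SA = (pvStepB edges)^[i] s0 := by
    rw [hSA, ← Nat.sub_add_cancel hi, Function.iterate_add_apply]
    exact Function.iterate_fixed hfix (edges.length - i)
  have hSAfix : pvStepB edges SA = SA := by
    rw [hSAeq]; exact hfix
  have hLoopA : pvLoopA relationships (relationships.length + 1) s0 = SA := by
    refine pvLoopA_eq_iter relationships (relationships.length + 1) s0 edges.length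
      ⟨i, by omega, hfix⟩ ⟨i, hi, hfix⟩
  -- the node universe for the DFS bound
  set allN := PySem.Set.ofList (initial_tables ++ edges.flatMap (fun e => [e.1, e.2])) with hallN
  have hDom : ∀ v nb, nb ∈ pvAdjList (pvAdjB relationships) v → nb ∈ allN := by
    intro v nb hnb
    obtain ⟨p, hp, hc⟩ := (pvAdj_mem_iff relationships v nb).mp hnb
    refine (PySem.Set.mem_ofList _ _).mpr (List.mem_append.mpr (Or.inr ?_))
    refine List.mem_flatMap.mpr ⟨p, hp, ?_⟩
    rcases hc with rfl | rfl <;> simp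
  have hvis0 : ∀ x ∈ s0, x ∈ allN := by
    intro x hx
    exact (PySem.Set.mem_ofList _ _).mpr
      (List.mem_append.mpr (Or.inl ((PySem.Set.mem_ofList _ _).mp hx)))
  have hstk0 : ∀ x ∈ initial_tables.reverse, x ∈ s0 := by
    intro x hx
    exact (PySem.Set.mem_ofList _ _).mpr (List.mem_reverse.mp hx)
  have hproc0 : ∀ v ∈ s0, v ∈ initial_tables.reverse
      ∨ ∀ nb ∈ pvAdjList (pvAdjB relationships) v, nb ∈ s0 := by
    intro v hv
    exact Or.inl (List.mem_reverse.mpr ((PySem.Set.mem_ofList _ _).mp hv))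
  have hbound0 : initial_tables.reverse.length + (allN.length - s0.length)
      ≤ initial_tables.length + 2 * relationships.length + 1 := by
    have h1 : allN.length ≤ s0.length + (edges.flatMap (fun e => [e.1, e.2])).length := by
      rw [hallN, PySem.Set.ofList_append, PySem.Set.update_eq_append_filter, List.length_append,
        ← hs0]
      have := List.length_filter_le
        (fun y => !(PySem.Set.contains s0 y)) (PySem.Set.ofList (edges.flatMap (fun e => [e.1, e.2])))
      have h2 := PySem.Set.length_ofList_le (edges.flatMap (fun e => [e.1, e.2]))
      omega
    have h3 : (edges.flatMap (fun e => [e.1, e.2])).length = 2 * relationships.length := by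
      rw [List.length_flatMap, ← hlenE]
      induction edges with
      | nil => simp
      | cons e t iht => simp at iht ⊢; omega
    rw [List.length_reverse]
    omega
  obtain ⟨hBsup, hBnd, hBcl, hBsound⟩ :=
    pvDfs_main (pvAdjB relationships) allN hDom
      (initial_tables.length + 2 * relationships.length + 1) initial_tables.reverse s0
      (PySem.Set.nodup_ofList initial_tables) hvis0 hstk0 hproc0 hbound0
  set SB := pvDfs (pvAdjB relationships) (initial_tables.length + 2 * relationships.length + 1)
    initial_tables.reverse s0 with hSB
  -- set-level equality of SA and SB
  have hSAnd : SA.Nodup := pvNodup_iter edges s0 (PySem.Set.nodup_ofList initial_tables) _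
  have hSAclE : pvClosedE edges SA := pvFix_closed edges SA hSAfix
  have hSAsup : ∀ x ∈ s0, x ∈ SA := (pvPrefix_iter edges s0 edges.length).subset
  have hmem : ∀ x, x ∈ SA ↔ x ∈ SB := by
    intro x
    constructor
    · exact fun hx => pvIter_sub edges s0 SB hBsup
        (pvClosedE_of_closedAdj relationships SB hBcl) edges.length x hx
    · exact fun hx => hBsound SA (pvClosedAdj_of_closedE relationships SA hSAclE) hSAsup x hx
  have hperm : SA.Perm SB := (List.perm_ext_iff_of_nodup hSAnd hBnd).mpr hmem
  -- both ports return the sorted elements, so the sorted lists agree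
  have hsorted : PySem.List.sorted SA (fun x => x) false = PySem.List.sorted SB (fun x => x) false :=
    PySem.List.sorted_eq_sorted_of_perm SA SB (fun x => x) (fun _ _ h => h) hperm
  rw [hLoopA]
  exact hsorted
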